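-- pv_equiv track=rewrite | github.com/pypi-data/pypi-mirror-400 | packages/topqad-sdk/topqad_sdk-0.4.0.tar.gz/topqad_sdk-0.4.0/src/topqad_sdk/noiseprofiler/libprotocols/lattice_surgery.py | validate_observable
-- ===== SOURCE A (Python) =====
-- from itertools import combinations
--
-- valid_observables = {
--     (("X", "X"), ("Z", "Z"), ("Z", "Z")): [("Z0", "Z1", "BDZ")],
--     (("X", "X"), ("Z", "Z"), ("Z", "X")): [],
--     (("X", "X"), ("Z", "Z"), ("X", "Z")): [],
--     (("X", "X"), ("Z", "Z"), ("X", "X")): [("X0", "X1", "BSX")],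
--     (("X", "X"), ("X", "X"), ("Z", "Z")): ["BSX"],
--     (("X", "X"), ("X", "X"), ("Z", "X")): ["X1", "BSX"],
--     (("X", "X"), ("X", "X"), ("X", "Z")): ["X0", "BSX"],
--     (("X", "X"), ("X", "X"), ("X", "X")): ["X0", "X1", "BSX"],
--     (("X", "X"), ("X", "Z"), ("Z", "Z")): [],
--     (("X", "X"), ("X", "Z"), ("Z", "X")): [("X1", "BSX")],
--     (("X", "X"), ("X", "Z"), ("X", "Z")): ["X0"],
--     (("X", "X"), ("X", "Z"), ("X", "X")): ["X0", ("X1", "BSX")],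
--     (("X", "X"), ("Z", "X"), ("Z", "Z")): [],
--     (("X", "X"), ("Z", "X"), ("Z", "X")): ["X1"],
--     (("X", "X"), ("Z", "X"), ("X", "Z")): [("X0", "BSX")],
--     (("X", "X"), ("Z", "X"), ("X", "X")): ["X1", ("X0", "BSX")],
--     (("Z", "Z"), ("X", "X"), ("X", "X")): [("X0", "X1", "BDX")],
--     (("Z", "Z"), ("X", "X"), ("X", "Z")): [],
--     (("Z", "Z"), ("X", "X"), ("Z", "X")): [],
--     (("Z", "Z"), ("X", "X"), ("Z", "Z")): [("Z0", "Z1", "BSZ")],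
--     (("Z", "Z"), ("Z", "Z"), ("X", "X")): ["BSZ"],
--     (("Z", "Z"), ("Z", "Z"), ("X", "Z")): ["Z1", "BSZ"],
--     (("Z", "Z"), ("Z", "Z"), ("Z", "X")): ["Z0", "BSZ"],
--     (("Z", "Z"), ("Z", "Z"), ("Z", "Z")): ["Z0", "Z1", "BSZ"],
--     (("Z", "Z"), ("Z", "X"), ("X", "X")): [],
--     (("Z", "Z"), ("Z", "X"), ("X", "Z")): [("Z1", "BSZ")],
--     (("Z", "Z"), ("Z", "X"), ("Z", "X")): ["Z0"],
--     (("Z", "Z"), ("Z", "X"), ("Z", "Z")): ["Z0", ("Z1", "BSZ")],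
--     (("Z", "Z"), ("X", "Z"), ("X", "X")): [],
--     (("Z", "Z"), ("X", "Z"), ("X", "Z")): ["Z1"],
--     (("Z", "Z"), ("X", "Z"), ("Z", "X")): [("Z0", "BSZ")],
--     (("Z", "Z"), ("X", "Z"), ("Z", "Z")): ["Z1", ("Z0", "BSZ")],
-- }
--
-- def _flatten_obs_combinations(input_set: list[set]) -> set[str]:
--     """Flatten nested observable combinations into a single set."""
--     str_obs = {item for item in input_set if isinstance(item, str)}
--     comb_obs = {
--         item
--         for sublist in input_set
--         for item in sublist
--         if not isinstance(sublist, str)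
--     }
--     return str_obs.union(comb_obs)
--
-- def validate_observable(
--     merge_observable: tuple[str, str],
--     preparation_basis: tuple[str, str],
--     measurement_basis: tuple[str, str],
--     logical_observable: tuple[str, ...],
-- ) -> bool:
--     """Validate if requested combination is valid.
--
--     Returns:
--         bool: True if combination is valid, else False.
--     """
--     # extract the observables
--     lst = valid_observables.get(
--         (merge_observable, preparation_basis, measurement_basis)
--     )
--     if lst is None:
--         return False
--     # Generate all valid combinations of observables.
--     allowed = [
--         _flatten_obs_combinations(comb)
--         for r in range(1, len(lst) + 1)
--         for comb in combinations(lst, r)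
--     ]
--     return set(logical_observable) in allowed
-- ===== SOURCE B (Python) =====
-- def _contribs_lo(L, O, p, b):
--     """Contribution sets for merge letter L (complement O)."""
--     pairs = {(L, L), (L, O), (O, L), (O, O)}
--     if p not in pairs or b not in pairs:
--         return None
--     if p == (O, O):
--         if b == (O, O):
--             return [{O + "0", O + "1", "BD" + O}]
--         if b == (L, L):
--             return [{L + "0", L + "1", "BS" + L}]
--         return []
--     if p == (L, L):
--         out = [{"BS" + L}]
--         if b[0] == L:
--             out.append({L + "0"})
--         if b[1] == L:
--             out.append({L + "1"})
--         return out
--     if p == (L, O):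
--         out = []
--         if b[0] == L:
--             out.append({L + "0"})
--         if b[1] == L:
--             out.append({L + "1", "BS" + L})
--         return out
--     # p == (O, L)
--     out = []
--     if b[1] == L:
--         out.append({L + "1"})
--     if b[0] == L:
--         out.append({L + "0", "BS" + L})
--     return out
--
--
-- def _contribution_sets(m, p, b):
--     """Compute the table entry's contribution sets by rule instead of lookup."""
--     if m == ("X", "X"):
--         return _contribs_lo("X", "Z", p, b)
--     if m == ("Z", "Z"):
--         return _contribs_lo("Z", "X", p, b)
--     return None
--
--
-- def validate_observable(
--     merge_observable,
--     preparation_basis,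
--     measurement_basis,
--     logical_observable,
-- ):
--     """Rule-based validation: compute the contribution sets directly (no lookup
--     table), then one linear covering pass (no power-set enumeration)."""
--     cs = _contribution_sets(merge_observable, preparation_basis, measurement_basis)
--     if cs is None:
--         return False
--     target = set(logical_observable)
--     covered = set()
--     for c in cs:
--         if c <= target:
--             covered |= c
--     return bool(target) and covered == target
-- ===== Notes on version B (the rewrite author's own statement) =====
-- stated objective: simpler
-- what changed: Replaces the 32-entry lookup table plus power-set enumeration of observable combinations with a direct rule-based computation of the contribution sets from the three bases and a single linear covering pass (union of the contribution sets contained in the target, compared with the target).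
import Mathlib
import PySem

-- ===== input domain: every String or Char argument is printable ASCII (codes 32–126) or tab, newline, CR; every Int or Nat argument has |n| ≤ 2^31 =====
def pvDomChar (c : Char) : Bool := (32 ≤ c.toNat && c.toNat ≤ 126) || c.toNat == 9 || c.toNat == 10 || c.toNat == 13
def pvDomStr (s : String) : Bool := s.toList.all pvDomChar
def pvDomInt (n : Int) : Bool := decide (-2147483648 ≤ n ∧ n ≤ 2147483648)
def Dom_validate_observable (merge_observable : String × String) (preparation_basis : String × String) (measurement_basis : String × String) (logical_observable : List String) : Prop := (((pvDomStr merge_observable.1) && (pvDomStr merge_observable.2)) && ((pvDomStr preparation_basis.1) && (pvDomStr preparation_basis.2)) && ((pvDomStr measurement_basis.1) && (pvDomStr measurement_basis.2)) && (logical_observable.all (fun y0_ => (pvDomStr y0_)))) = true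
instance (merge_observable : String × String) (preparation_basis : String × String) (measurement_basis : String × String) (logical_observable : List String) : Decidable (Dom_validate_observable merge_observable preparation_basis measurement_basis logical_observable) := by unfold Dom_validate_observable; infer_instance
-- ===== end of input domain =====

-- B replaces A's 32-entry lookup table and power-set enumeration of observable
-- combinations by a rule-based computation of the contribution sets from the three
-- bases and one linear covering pass: simpler (no table, no enumeration).

-- ===== PORT A =====

-- an element of a table value: a plain string or a tuple of strings
inductive Obs where
  | s : String → Obs
  | t : List String → Obs
deriving DecidableEq, Repr

-- the module-level dict `valid_observables` of A
def validObservables : PySem.Dict ((String × String) × (String × String) × (String × String)) (List Obs) :=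
  PySem.Dict.ofList [
    ((("X", "X"), ("Z", "Z"), ("Z", "Z")), [.t ["Z0", "Z1", "BDZ"]]),
    ((("X", "X"), ("Z", "Z"), ("Z", "X")), []),
    ((("X", "X"), ("Z", "Z"), ("X", "Z")), []),
    ((("X", "X"), ("Z", "Z"), ("X", "X")), [.t ["X0", "X1", "BSX"]]),
    ((("X", "X"), ("X", "X"), ("Z", "Z")), [.s "BSX"]),
    ((("X", "X"), ("X", "X"), ("Z", "X")), [.s "X1", .s "BSX"]),
    ((("X", "X"), ("X", "X"), ("X", "Z")), [.s "X0", .s "BSX"]),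
    ((("X", "X"), ("X", "X"), ("X", "X")), [.s "X0", .s "X1", .s "BSX"]),
    ((("X", "X"), ("X", "Z"), ("Z", "Z")), []),
    ((("X", "X"), ("X", "Z"), ("Z", "X")), [.t ["X1", "BSX"]]),
    ((("X", "X"), ("X", "Z"), ("X", "Z")), [.s "X0"]),
    ((("X", "X"), ("X", "Z"), ("X", "X")), [.s "X0", .t ["X1", "BSX"]]),
    ((("X", "X"), ("Z", "X"), ("Z", "Z")), []),
    ((("X", "X"), ("Z", "X"), ("Z", "X")), [.s "X1"]),
    ((("X", "X"), ("Z", "X"), ("X", "Z")), [.t ["X0", "BSX"]]),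
    ((("X", "X"), ("Z", "X"), ("X", "X")), [.s "X1", .t ["X0", "BSX"]]),
    ((("Z", "Z"), ("X", "X"), ("X", "X")), [.t ["X0", "X1", "BDX"]]),
    ((("Z", "Z"), ("X", "X"), ("X", "Z")), []),
    ((("Z", "Z"), ("X", "X"), ("Z", "X")), []),
    ((("Z", "Z"), ("X", "X"), ("Z", "Z")), [.t ["Z0", "Z1", "BSZ"]]),
    ((("Z", "Z"), ("Z", "Z"), ("X", "X")), [.s "BSZ"]),
    ((("Z", "Z"), ("Z", "Z"), ("X", "Z")), [.s "Z1", .s "BSZ"]),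
    ((("Z", "Z"), ("Z", "Z"), ("Z", "X")), [.s "Z0", .s "BSZ"]),
    ((("Z", "Z"), ("Z", "Z"), ("Z", "Z")), [.s "Z0", .s "Z1", .s "BSZ"]),
    ((("Z", "Z"), ("Z", "X"), ("X", "X")), []),
    ((("Z", "Z"), ("Z", "X"), ("X", "Z")), [.t ["Z1", "BSZ"]]),
    ((("Z", "Z"), ("Z", "X"), ("Z", "X")), [.s "Z0"]),
    ((("Z", "Z"), ("Z", "X"), ("Z", "Z")), [.s "Z0", .t ["Z1", "BSZ"]]),
    ((("Z", "Z"), ("X", "Z"), ("X", "X")), []),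
    ((("Z", "Z"), ("X", "Z"), ("X", "Z")), [.s "Z1"]),
    ((("Z", "Z"), ("X", "Z"), ("Z", "X")), [.t ["Z0", "BSZ"]]),
    ((("Z", "Z"), ("X", "Z"), ("Z", "Z")), [.s "Z1", .t ["Z0", "BSZ"]])]

-- `_flatten_obs_combinations`: the two set comprehensions, then their union
def flattenObsCombinations (inputSet : List Obs) : PySem.Set String :=
  let strObs : PySem.Set String :=
    PySem.Set.ofList (inputSet.filterMap (fun item => match item with | .s x => some x | .t _ => none))
  let combObs : PySem.Set String :=
    PySem.Set.ofList (inputSet.flatMap (fun sublist => match sublist with | .s _ => [] | .t l => l))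
  PySem.Set.union strObs combObs

-- itertools.combinations(xs, r) (lexicographic in index order; orderless use below)
def combos : Nat → List Obs → List (List Obs)
  | 0, _ => [[]]
  | _ + 1, [] => []
  | r + 1, x :: xs => (combos r xs).map (x :: ·) ++ combos (r + 1) xs

def validate_observable (merge_observable : String × String) (preparation_basis : String × String) (measurement_basis : String × String) (logical_observable : List String) : Bool :=
  match PySem.Dict.get? validObservables (merge_observable, preparation_basis, measurement_basis) with
  | none => false
  | some lst =>
    let allowed := (List.range' 1 lst.length).flatMap (fun r => (combos r lst).map flattenObsCombinations)
    -- `set(logical_observable) in allowed`: list membership with Python set equality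
    allowed.any (fun sset => PySem.Set.equal (PySem.Set.ofList logical_observable) sset)

-- ===== PORT B =====

-- B's `pairs = {(L,L),(L,O),(O,L),(O,O)}` (used only for membership tests)
def pairsOf (L O : String) : List (String × String) := [(L, L), (L, O), (O, L), (O, O)]

-- the branch ladder of `_contribution_sets` after the validity guards
def entrySets (L O : String) (p b : String × String) : List (PySem.Set String) :=
  if p = (O, O) then
    if b = (O, O) then [PySem.Set.ofList [O ++ "0", O ++ "1", "BD" ++ O]]
    else if b = (L, L) then [PySem.Set.ofList [L ++ "0", L ++ "1", "BS" ++ L]]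
    else []
  else if p = (L, L) then
    [PySem.Set.ofList ["BS" ++ L]]
      ++ (if b.1 = L then [PySem.Set.ofList [L ++ "0"]] else [])
      ++ (if b.2 = L then [PySem.Set.ofList [L ++ "1"]] else [])
  else if p = (L, O) then
    (if b.1 = L then [PySem.Set.ofList [L ++ "0"]] else [])
      ++ (if b.2 = L then [PySem.Set.ofList [L ++ "1", "BS" ++ L]] else [])
  else  -- p = (O, L)
    (if b.2 = L then [PySem.Set.ofList [L ++ "1"]] else [])
      ++ (if b.1 = L then [PySem.Set.ofList [L ++ "0", "BS" ++ L]] else [])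

-- `_contribs_lo`: validity guard for merge letter L (complement O), then the rules
def altContribsLO (L O : String) (p b : String × String) : Option (List (PySem.Set String)) :=
  if p ∈ pairsOf L O ∧ b ∈ pairsOf L O then some (entrySets L O p b) else none

-- `_contribution_sets`: rule-based computation of the contribution sets (none = invalid bases)
def altContribs (m p b : String × String) : Option (List (PySem.Set String)) :=
  if m = ("X", "X") then altContribsLO "X" "Z" p b
  else if m = ("Z", "Z") then altContribsLO "Z" "X" p b
  else none

def validate_observable_alt (merge_observable : String × String) (preparation_basis : String × String) (measurement_basis : String × String) (logical_observable : List String) : Bool :=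
  match altContribs merge_observable preparation_basis measurement_basis with
  | none => false
  | some cs =>
    let target : PySem.Set String := PySem.Set.ofList logical_observable
    let covered := cs.foldl (fun acc c =>
      if PySem.Set.issubset c target then PySem.Set.union acc c else acc)
      (PySem.Set.empty : PySem.Set String)
    (!target.isEmpty) && PySem.Set.equal covered target

-- ===== PRECONDITION & SPEC =====
def Spec_validate_observable (merge_observable : String × String) (preparation_basis : String × String) (measurement_basis : String × String) (logical_observable : List String) (out : Bool) : Prop := out = validate_observable_alt merge_observable preparation_basis measurement_basis logical_observable
instance (merge_observable : String × String) (preparation_basis : String × String) (measurement_basis : String × String) (logical_observable : List String) (out : Bool) : Decidable (Spec_validate_observable merge_observable preparation_basis measurement_basis logical_observable out) := by unfold Spec_validate_observable; infer_instance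

-- ===== CLAIM (what is proved, stated in full; the proofs are below) =====
def Claim_equal_validate_observable : Prop := ∀ (merge_observable : String × String) (preparation_basis : String × String) (measurement_basis : String × String) (logical_observable : List String), Dom_validate_observable merge_observable preparation_basis measurement_basis logical_observable → Spec_validate_observable merge_observable preparation_basis measurement_basis logical_observable (validate_observable merge_observable preparation_basis measurement_basis logical_observable)

-- ===== LEMMAS AND PROOFS =====

-- proof abbreviation: the element as a contribution set ({e} if str else set(e))
def contribOf (e : Obs) : PySem.Set String :=
  match e with
  | .s x => PySem.Set.ofList [x]
  | .t l => PySem.Set.ofList l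

-- B's covering pass as a named function (proof vocabulary only)
def coverPass (cs : List (PySem.Set String)) (target : PySem.Set String) : Bool :=
  (!target.isEmpty) && PySem.Set.equal
    (cs.foldl (fun acc c => if PySem.Set.issubset c target then PySem.Set.union acc c else acc)
      (PySem.Set.empty : PySem.Set String)) target

theorem mem_flattenObsCombinations {x : String} {c : List Obs} :
    x ∈ flattenObsCombinations c ↔ ∃ e ∈ c, x ∈ contribOf e := by
  simp only [flattenObsCombinations, PySem.Set.mem_union, PySem.Set.mem_ofList,
    List.mem_filterMap, List.mem_flatMap]
  constructor
  · rintro (⟨e, he, hx⟩ | ⟨e, he, hx⟩) <;> refine ⟨e, he, ?_⟩ <;>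
      cases e <;> simp_all [contribOf, PySem.Set.mem_ofList]
  · rintro ⟨e, he, hx⟩
    cases e with
    | s a =>
      refine Or.inl ⟨.s a, he, ?_⟩
      simp only [contribOf, PySem.Set.mem_ofList, List.mem_singleton] at hx
      simp [hx]
    | t l => exact Or.inr ⟨.t l, he, by simpa [contribOf, PySem.Set.mem_ofList] using hx⟩

theorem mem_combos {r : Nat} {xs c : List Obs} :
    c ∈ combos r xs ↔ c.Sublist xs ∧ c.length = r := by
  induction xs generalizing r c with
  | nil =>
    cases r with
    | zero => simp [combos, List.sublist_nil]
    | succ r =>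
      simp only [combos, List.not_mem_nil, false_iff, not_and]
      intro hs
      simp [List.sublist_nil.mp hs]
  | cons x xs ih =>
    cases r with
    | zero =>
      simp only [combos, List.mem_singleton]
      constructor
      · rintro rfl; exact ⟨List.nil_sublist _, rfl⟩
      · rintro ⟨_, hl⟩; exact List.eq_nil_of_length_eq_zero hl
    | succ r =>
      simp only [combos, List.mem_append, List.mem_map, ih]
      constructor
      · rintro (⟨c', ⟨hs, hl⟩, rfl⟩ | ⟨hs, hl⟩)
        · exact ⟨List.Sublist.cons₂ x hs, by simp [hl]⟩
        · exact ⟨hs.cons x, hl⟩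
      · rintro ⟨hs, hl⟩
        rcases List.sublist_cons_iff.mp hs with h | ⟨c', rfl, hc'⟩
        · exact Or.inr ⟨h, hl⟩
        · exact Or.inl ⟨c', ⟨hc', by simpa using hl⟩, rfl⟩

-- membership in B's accumulated `covered` set
theorem covered_mem {target : PySem.Set String} {cs : List (PySem.Set String)}
    {acc : PySem.Set String} {x : String} :
    x ∈ cs.foldl (fun acc c =>
      if PySem.Set.issubset c target then PySem.Set.union acc c else acc) acc ↔
    x ∈ acc ∨ ∃ c ∈ cs, PySem.Set.issubset c target = true ∧ x ∈ c := by
  induction cs generalizing acc with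
  | nil => simp
  | cons c cs ih =>
    simp only [List.foldl_cons, ih, List.mem_cons]
    by_cases h : PySem.Set.issubset c target = true
    · simp only [h, if_pos, PySem.Set.mem_union]
      constructor
      · rintro ((hx | hx) | ⟨c', hc', hs, hx⟩)
        · exact Or.inl hx
        · exact Or.inr ⟨c, Or.inl rfl, h, hx⟩
        · exact Or.inr ⟨c', Or.inr hc', hs, hx⟩
      · rintro (hx | ⟨c', (rfl | hc'), hs, hx⟩)
        · exact Or.inl (Or.inl hx)
        · exact Or.inl (Or.inr hx)
        · exact Or.inr ⟨c', hc', hs, hx⟩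
    · simp only [if_neg h]
      constructor
      · rintro (hx | ⟨c', hc', hs, hx⟩)
        · exact Or.inl hx
        · exact Or.inr ⟨c', Or.inr hc', hs, hx⟩
      · rintro (hx | ⟨c', (rfl | hc'), hs, hx⟩)
        · exact Or.inl hx
        · exact absurd hs h
        · exact Or.inr ⟨c', hc', hs, hx⟩

-- `coverPass cs target = true` characterised by membership only
theorem coverPass_iff {cs : List (PySem.Set String)} {target : PySem.Set String} :
    coverPass cs target = true ↔
    (∃ x, x ∈ target) ∧ ∀ x, x ∈ target ↔ ∃ c ∈ cs, PySem.Set.issubset c target = true ∧ x ∈ c := by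
  simp only [coverPass, Bool.and_eq_true, Bool.not_eq_true', List.isEmpty_eq_false_iff_exists_mem,
    PySem.Set.equal_iff]
  constructor
  · rintro ⟨hne, heq⟩
    refine ⟨hne, fun x => ?_⟩
    rw [← heq x, covered_mem]
    simp [PySem.Set.empty]
  · rintro ⟨hne, heq⟩
    refine ⟨hne, fun x => ?_⟩
    rw [covered_mem, ← heq x]
    simp [PySem.Set.empty]

theorem coverPass_congr {cs₁ cs₂ : List (PySem.Set String)} {target : PySem.Set String}
    (h : ∀ c, c ∈ cs₁ ↔ c ∈ cs₂) : coverPass cs₁ target = coverPass cs₂ target := by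
  rw [Bool.eq_iff_iff, coverPass_iff, coverPass_iff]
  have hx : ∀ x, (∃ c ∈ cs₁, PySem.Set.issubset c target = true ∧ x ∈ c) ↔
      ∃ c ∈ cs₂, PySem.Set.issubset c target = true ∧ x ∈ c := fun x =>
    ⟨by rintro ⟨c, hc, hs, hxc⟩; exact ⟨c, (h c).mp hc, hs, hxc⟩,
     by rintro ⟨c, hc, hs, hxc⟩; exact ⟨c, (h c).mpr hc, hs, hxc⟩⟩
  constructor <;> rintro ⟨hne, heq⟩
  · exact ⟨hne, fun x => (heq x).trans (hx x)⟩
  · exact ⟨hne, fun x => (heq x).trans (hx x).symm⟩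

-- the core equivalence: A's power-set test equals B's covering pass over the contributions
theorem core_eq (lst : List Obs) (H : ∀ e ∈ lst, contribOf e ≠ [])
    (logical_observable : List String) :
    ((List.range' 1 lst.length).flatMap (fun r => (combos r lst).map flattenObsCombinations)).any
      (fun sset => PySem.Set.equal (PySem.Set.ofList logical_observable) sset) =
    coverPass (lst.map contribOf) (PySem.Set.ofList logical_observable) := by
  set target : PySem.Set String := PySem.Set.ofList logical_observable with htarget
  rw [Bool.eq_iff_iff, coverPass_iff]
  simp only [List.any_eq_true, List.mem_flatMap, List.mem_map, List.mem_range'_1,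
    PySem.Set.equal_iff]
  constructor
  · rintro ⟨sset, ⟨r, ⟨hr1, _⟩, c, hc, rfl⟩, heq⟩
    rcases mem_combos.mp hc with ⟨hsub, hlen⟩
    have hsubc : ∀ e ∈ c, PySem.Set.issubset (contribOf e) target = true := by
      intro e he
      rw [PySem.Set.issubset_iff]
      intro x hx
      exact (heq x).mpr (mem_flattenObsCombinations.mpr ⟨e, he, hx⟩)
    have hcne : c ≠ [] := by
      intro h; subst h; simp at hlen; omega
    obtain ⟨e0, he0⟩ := List.exists_mem_of_ne_nil c hcne
    obtain ⟨x0, hx0⟩ := List.exists_mem_of_ne_nil _ (H e0 (hsub.mem he0))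
    refine ⟨⟨x0, (heq x0).mpr (mem_flattenObsCombinations.mpr ⟨e0, he0, hx0⟩)⟩, ?_⟩
    intro x
    constructor
    · intro hx
      rcases mem_flattenObsCombinations.mp ((heq x).mp hx) with ⟨e, he, hxe⟩
      exact ⟨contribOf e, ⟨e, hsub.mem he, rfl⟩, hsubc e he, hxe⟩
    · rintro ⟨c', hc', hs, hx⟩
      exact ((PySem.Set.issubset_iff _ _).mp hs) x hx
  · rintro ⟨⟨x0, hx0⟩, heq⟩
    set c := lst.filter (fun e => PySem.Set.issubset (contribOf e) target) with hcdef
    have hflat : ∀ x, x ∈ target ↔ x ∈ flattenObsCombinations c := by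
      intro x
      rw [mem_flattenObsCombinations, heq x]
      constructor
      · rintro ⟨c', ⟨e, he, rfl⟩, hs, hx⟩
        exact ⟨e, by simp [hcdef, List.mem_filter, he, hs], hx⟩
      · rintro ⟨e, he, hx⟩
        rcases List.mem_filter.mp he with ⟨he', hs⟩
        exact ⟨contribOf e, ⟨e, he', rfl⟩, hs, hx⟩
    have hx0c : x0 ∈ flattenObsCombinations c := (hflat x0).mp hx0
    have hcne : c ≠ [] := by
      rcases mem_flattenObsCombinations.mp hx0c with ⟨e, he, _⟩
      exact List.ne_nil_of_mem he
    have hsub : c.Sublist lst := List.filter_sublist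
    refine ⟨flattenObsCombinations c, ⟨c.length, ⟨?_, ?_⟩, c, mem_combos.mpr ⟨hsub, rfl⟩, rfl⟩, ?_⟩
    · exact Nat.one_le_iff_ne_zero.mpr (fun h => hcne (List.eq_nil_of_length_eq_zero h))
    · have := hsub.length_le; omega
    · intro x; exact hflat x

-- per-table-entry glue: B's rule produces the same contributions (as a set of sets,
-- each one non-empty) as A's table entry
def okEntry (kv : (((String × String) × (String × String) × (String × String)) × List Obs)) : Bool :=
  match altContribs kv.1.1 kv.1.2.1 kv.1.2.2 with
  | none => false
  | some cs =>
      cs.all (fun c => (kv.2.map contribOf).contains c) &&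
      (kv.2.map contribOf).all (fun c => cs.contains c) &&
      kv.2.all (fun e => !(contribOf e).isEmpty)

theorem table_ok : ∀ kv ∈ validObservables.items, okEntry kv = true := by decide

-- B's rule only fires on keys present in A's table
theorem alt_some_table {m p b : String × String} {cs : List (PySem.Set String)}
    (h : altContribs m p b = some cs) :
    (PySem.Dict.get? validObservables (m, p, b)).isSome = true := by
  unfold altContribs at h
  by_cases hm1 : m = ("X", "X")
  · rw [if_pos hm1] at h
    subst hm1
    unfold altContribsLO at h
    by_cases hpb : p ∈ pairsOf "X" "Z" ∧ b ∈ pairsOf "X" "Z"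
    · obtain ⟨hp, hb⟩ := hpb
      simp only [pairsOf, List.mem_cons, List.not_mem_nil, or_false] at hp hb
      rcases hp with hp | hp | hp | hp <;> rcases hb with hb | hb | hb | hb <;>
        subst hp <;> subst hb <;> decide
    · rw [if_neg hpb] at h
      simp at h
  · rw [if_neg hm1] at h
    by_cases hm2 : m = ("Z", "Z")
    · rw [if_pos hm2] at h
      subst hm2
      unfold altContribsLO at h
      by_cases hpb : p ∈ pairsOf "Z" "X" ∧ b ∈ pairsOf "Z" "X"
      · obtain ⟨hp, hb⟩ := hpb
        simp only [pairsOf, List.mem_cons, List.not_mem_nil, or_false] at hp hb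
        rcases hp with hp | hp | hp | hp <;> rcases hb with hb | hb | hb | hb <;>
          subst hp <;> subst hb <;> decide
      · rw [if_neg hpb] at h
        simp at h
    · rw [if_neg hm2] at h
      simp at h

-- ===== VERDICT (by name: the statement is the Claim_ definition above) =====
theorem validate_observable_spec : Claim_equal_validate_observable := by
  intro m p b lo _
  unfold Spec_validate_observable validate_observable validate_observable_alt
  cases hget : PySem.Dict.get? validObservables (m, p, b) with
  | none =>
    cases halt : altContribs m p b with
    | none => rfl
    | some cs =>
      have := alt_some_table halt
      rw [hget] at this
      simp at this
  | some lst =>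
    have hok := table_ok _ (PySem.Dict.mem_items_of_get?_eq_some _ hget)
    cases halt : altContribs m p b with
    | none => simp [okEntry, halt] at hok
    | some cs =>
      simp only [okEntry, halt, Bool.and_eq_true, List.all_eq_true] at hok
      obtain ⟨⟨h1, h2⟩, h3⟩ := hok
      have hmem : ∀ c, c ∈ cs ↔ c ∈ lst.map contribOf := by
        intro c
        constructor
        · intro hc
          have := h1 c hc
          simpa using this
        · intro hc
          have := h2 c hc
          simpa using this
      have hne : ∀ e ∈ lst, contribOf e ≠ [] := by
        intro e he
        have := h3 e he
        simpa [List.isEmpty_iff] using this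
      calc _ = coverPass (lst.map contribOf) (PySem.Set.ofList lo) := core_eq lst hne lo
        _ = coverPass cs (PySem.Set.ofList lo) := coverPass_congr (fun c => (hmem c).symm)
        _ = _ := rfl
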